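-- pv_equiv track=rewrite | github.com/aimleap/grc-prod-mapping | produce.py | removeLastSFromTitle
-- ===== SOURCE A (Python) =====
-- def removeLastSFromTitle(tempList):
--     s_keywords = ['peppers','mushrooms','carrots','potatoes','tomatoes','cuts','apples','beets',
--     'onions','lemons','beans','limes','cucumbers','keylimes','mangos','papayas',
--     'coconuts','sprouts','oranges']
--     newTi = []
--     for i in tempList:
--         if i in s_keywords:
--             newTi.append(i.replace("s",''))
--         else:
--             newTi.append(i)
--     newTi = list(set(newTi))
--     newTi.sort()
--     return " ".join(newTi)
-- ===== SOURCE B (Python) =====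
-- def removeLastSFromTitle(tempList):
--     s_keywords = ['peppers','mushrooms','carrots','potatoes','tomatoes','cuts','apples','beets',
--     'onions','lemons','beans','limes','cucumbers','keylimes','mangos','papayas',
--     'coconuts','sprouts','oranges']
--     out = []  # kept sorted and duplicate-free throughout
--     for t in tempList:
--         v = t.replace("s", "") if t in s_keywords else t
--         i = 0
--         while i < len(out) and out[i] < v:
--             i += 1
--         if i == len(out) or out[i] != v:
--             out.insert(i, v)
--     return " ".join(out)
-- ===== Notes on version B (the rewrite author's own statement) =====
-- stated objective: alternative
-- what changed: Replaces A's three-stage map/set-dedup/sort pipeline with a single pass that keeps one sorted duplicate-free list via ordered insertion (no set, no separate sort step).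
import Mathlib
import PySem

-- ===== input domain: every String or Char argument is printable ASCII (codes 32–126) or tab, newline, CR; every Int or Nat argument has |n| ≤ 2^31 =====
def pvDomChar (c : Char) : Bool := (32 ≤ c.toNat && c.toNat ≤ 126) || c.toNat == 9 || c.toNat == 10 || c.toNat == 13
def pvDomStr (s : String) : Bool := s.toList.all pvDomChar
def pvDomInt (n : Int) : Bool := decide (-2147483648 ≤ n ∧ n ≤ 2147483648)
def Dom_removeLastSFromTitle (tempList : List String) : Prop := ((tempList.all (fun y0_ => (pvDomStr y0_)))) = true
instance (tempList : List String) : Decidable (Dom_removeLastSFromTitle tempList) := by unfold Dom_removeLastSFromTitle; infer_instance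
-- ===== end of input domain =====

-- B replaces A's map/set-dedup/sort pipeline by one pass keeping a sorted duplicate-free list via ordered insertion; same result, alternative structure.

-- ===== PORT A =====
def removeLastSFromTitle (tempList : List String) : String :=
  let sKeywords : List String := ["peppers","mushrooms","carrots","potatoes","tomatoes","cuts","apples","beets",
    "onions","lemons","beans","limes","cucumbers","keylimes","mangos","papayas",
    "coconuts","sprouts","oranges"]
  let newTi := tempList.foldl (fun acc i =>
    if sKeywords.contains i then acc ++ [PySem.Str.replace i "s" ""]
    else acc ++ [i]) []
  let newTi2 := PySem.Set.ofList newTi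
  let newTi3 := PySem.List.sorted newTi2 (fun x => x) false
  PySem.Str.join " " newTi3

-- ===== PORT B =====
-- B's while-scan + conditional list.insert: walk past the elements < v, then
-- insert v unless it is already at that position (port of Source B's inner loop).
def insSorted (v : String) : List String → List String
  | [] => [v]
  | x :: t => if x < v then x :: insSorted v t else if x = v then x :: t else v :: x :: t

def removeLastSFromTitle_alt (tempList : List String) : String :=
  let sKeywords : List String := ["peppers","mushrooms","carrots","potatoes","tomatoes","cuts","apples","beets",
    "onions","lemons","beans","limes","cucumbers","keylimes","mangos","papayas",
    "coconuts","sprouts","oranges"]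
  let out := tempList.foldl (fun out t =>
    let v := if sKeywords.contains t then PySem.Str.replace t "s" "" else t
    insSorted v out) []
  PySem.Str.join " " out

-- ===== PRECONDITION & SPEC =====
def Spec_removeLastSFromTitle (tempList : List String) (out : String) : Prop := out = removeLastSFromTitle_alt tempList
instance (tempList : List String) (out : String) : Decidable (Spec_removeLastSFromTitle tempList out) := by unfold Spec_removeLastSFromTitle; infer_instance

-- ===== CLAIM (what is proved, stated in full; the proofs are below) =====
def Claim_equal_removeLastSFromTitle : Prop := ∀ (tempList : List String), Dom_removeLastSFromTitle tempList → Spec_removeLastSFromTitle tempList (removeLastSFromTitle tempList)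

-- ===== LEMMAS AND PROOFS =====

theorem mem_insSorted (a v : String) (l : List String) :
    a ∈ insSorted v l ↔ a = v ∨ a ∈ l := by
  induction l with
  | nil => simp [insSorted]
  | cons x t ih =>
    by_cases h1 : x < v
    · simp only [insSorted, if_pos h1, List.mem_cons, ih]; tauto
    · by_cases h2 : x = v
      · subst h2; simp [insSorted]
      · simp only [insSorted, if_neg h1, if_neg h2, List.mem_cons]

theorem pairwise_insSorted (v : String) (l : List String) (h : l.Pairwise (· < ·)) :
    (insSorted v l).Pairwise (· < ·) := by
  induction l with
  | nil => simp [insSorted]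
  | cons x t ih =>
    rw [List.pairwise_cons] at h
    obtain ⟨hx, ht⟩ := h
    by_cases h1 : x < v
    · rw [insSorted, if_pos h1, List.pairwise_cons]
      refine ⟨fun a ha => ?_, ih ht⟩
      rcases (mem_insSorted a v t).mp ha with rfl | ha
      · exact h1
      · exact hx a ha
    · by_cases h2 : x = v
      · subst h2
        rw [insSorted, if_neg h1, if_pos rfl, List.pairwise_cons]
        exact ⟨hx, ht⟩
      · have hv : v < x := lt_of_le_of_ne (le_of_not_gt h1) (fun e => h2 e.symm)
        rw [insSorted, if_neg h1, if_neg h2, List.pairwise_cons]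
        refine ⟨fun a ha => ?_, List.pairwise_cons.mpr ⟨hx, ht⟩⟩
        rcases List.mem_cons.mp ha with rfl | ha
        · exact hv
        · exact lt_trans hv (hx a ha)

-- B's fold keeps a strictly sorted accumulator whose members are the mapped inputs
theorem fold_ins_spec (f : String → String) (xs : List String) (acc : List String)
    (hacc : acc.Pairwise (· < ·)) :
    (List.foldl (fun out t => insSorted (f t) out) acc xs).Pairwise (· < ·) ∧
    ∀ a, a ∈ List.foldl (fun out t => insSorted (f t) out) acc xs ↔ a ∈ acc ∨ a ∈ xs.map f := by
  induction xs generalizing acc with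
  | nil => exact ⟨hacc, fun a => by simp⟩
  | cons x t ih =>
    have h := ih (insSorted (f x) acc) (pairwise_insSorted (f x) acc hacc)
    refine ⟨h.1, fun a => ?_⟩
    rw [List.foldl_cons, h.2 a, mem_insSorted]
    simp only [List.map_cons, List.mem_cons]
    tauto

theorem foldl_branch_eq_map (p : String → Bool) (f : String → String)
    (xs : List String) (acc : List String) :
    List.foldl (fun acc i => if p i = true then acc ++ [f i] else acc ++ [i]) acc xs
      = acc ++ xs.map (fun i => if p i = true then f i else i) := by
  induction xs generalizing acc with
  | nil => simp
  | cons x t ih =>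
    by_cases h : p x = true <;> simp [h, ih]

theorem sorted_set_eq_fold_ins (f : String → String) (xs : List String) :
    PySem.List.sorted (PySem.Set.ofList (xs.map f)) (fun x => x) false
      = List.foldl (fun out t => insSorted (f t) out) [] xs := by
  obtain ⟨hpw, hmem⟩ := fold_ins_spec f xs [] (by simp)
  apply PySem.List.sorted_eq_of_perm_of_pairwise_lt
  · have hnodup1 : (List.foldl (fun out t => insSorted (f t) out) [] xs).Nodup :=
      hpw.imp ne_of_lt
    rw [List.perm_ext_iff_of_nodup hnodup1 (PySem.Set.nodup_ofList _)]
    intro a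
    rw [PySem.Set.mem_ofList, hmem a]
    simp
  · simpa using hpw

-- ===== VERDICT (by name: the statement is the Claim_ definition above) =====
theorem removeLastSFromTitle_spec : Claim_equal_removeLastSFromTitle := by
  intro tempList _
  unfold Spec_removeLastSFromTitle removeLastSFromTitle removeLastSFromTitle_alt
  simp only
  rw [foldl_branch_eq_map
      ((["peppers","mushrooms","carrots","potatoes","tomatoes","cuts","apples","beets",
    "onions","lemons","beans","limes","cucumbers","keylimes","mangos","papayas",
    "coconuts","sprouts","oranges"] : List String).contains)
      (fun i => PySem.Str.replace i "s" "")]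
  simp only [List.nil_append]
  rw [sorted_set_eq_fold_ins]
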